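-- pv_equiv track=rewrite | github.com/danieltanner44/Python_Programming | Advent_of_Code/Advent_of_Code_2024/Day9/main_part12.py | find_available_space_blocks
-- ===== SOURCE A (Python) =====
-- def find_available_space_blocks(filesystem):
--     # This subroutine scans the filesystem and identifies available spaces for data
--     # The available spaces is saved as the following structure: [[start index, length], ...]
--     available_space_blocks = []
--     in_space_block = False
--     for index in range(len(filesystem)):
--         # Find space blocks
--         # Find first space in block
--         if filesystem[index] == "." and not in_space_block:
--             temp = [index]  # Start a new space block
--             space_counter = 1   # It's length starts at 1
--             in_space_block = True   # Now we are in a space block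
--         elif filesystem[index] == "." and in_space_block:
--             # If we are in a space block and the current filesystem value is a space then increase length by 1
--             space_counter += 1
--             if index == len(filesystem) - 1:    # If we are at the end of the filesystem we need to stop
--                 temp.extend([space_counter])
--                 available_space_blocks.append(temp)
--         elif filesystem[index] != "." and in_space_block:
--             # If the current data value is not a space and we were in a space block then the block is complete
--             in_space_block = False
--             temp.extend([space_counter])
--             available_space_blocks.append(temp)
--     return available_space_blocks
-- ===== SOURCE B (Python) =====
-- def find_available_space_blocks(filesystem):
--     # Two-pointer run scanner: for each maximal run of equal kind, emit
--     # [start, length] when the run consists of spaces.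
--     blocks = []
--     i = 0
--     n = len(filesystem)
--     while i < n:
--         is_space = filesystem[i] == "."
--         j = i + 1
--         while j < n and (filesystem[j] == ".") == is_space:
--             j += 1
--         if is_space:
--             blocks.append([i, j - i])
--         i = j
--     return blocks
-- ===== Notes on version B (the rewrite author's own statement) =====
-- stated objective: simpler
-- what changed: Replaced the in_space_block flag machine with its special end-of-array flush by a two-pointer scan over maximal runs that emits [start, length] per space run.
-- intended difference: On inputs whose last element is '.' but whose second-to-last element is not (a trailing space run of length exactly 1), A never flushes the block it just opened and omits it, while B returns the block [n-1, 1], which is the intended value since the run is a real space block. — e.g. on find_available_space_blocks(["."]): A returns [], B returns [[0, 1]]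
import Mathlib
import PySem

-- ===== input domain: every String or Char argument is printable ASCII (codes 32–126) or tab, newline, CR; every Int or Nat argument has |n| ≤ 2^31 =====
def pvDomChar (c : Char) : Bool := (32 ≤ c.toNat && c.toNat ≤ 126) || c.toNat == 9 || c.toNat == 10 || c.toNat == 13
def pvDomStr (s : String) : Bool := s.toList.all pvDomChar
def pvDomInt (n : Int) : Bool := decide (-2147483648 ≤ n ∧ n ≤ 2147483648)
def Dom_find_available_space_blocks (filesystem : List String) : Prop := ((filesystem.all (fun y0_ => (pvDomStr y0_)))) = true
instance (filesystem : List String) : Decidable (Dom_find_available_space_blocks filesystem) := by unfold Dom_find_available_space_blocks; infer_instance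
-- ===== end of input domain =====

-- B replaces A's in_space_block flag machine (with its end-of-array flush) by a
-- two-pointer scan over maximal runs; objective: simpler. A drops a trailing
-- space run of length exactly 1 (never flushed); B reports it (see D_ below).

-- ===== PORT A =====
-- loop body of A's for-loop; state = (available_space_blocks, in_space_block, temp, space_counter)
def pvStepA (n : Nat) (index : Nat) (x : String)
    (s : List (List Int) × Bool × List Int × Int) :
    List (List Int) × Bool × List Int × Int :=
  let (blocks, inb, temp, cnt) := s
  if x == "." && !inb then
    (blocks, true, [(index : Int)], 1)
  else if x == "." && inb then
    let cnt := cnt + 1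
    if index == n - 1 then (blocks ++ [temp ++ [cnt]], inb, temp ++ [cnt], cnt)
    else (blocks, inb, temp, cnt)
  else if x != "." && inb then
    (blocks ++ [temp ++ [cnt]], false, temp ++ [cnt], cnt)
  else
    (blocks, inb, temp, cnt)

def find_available_space_blocks (filesystem : List String) : List (List Int) :=
  ((List.range filesystem.length).foldl
    (fun s index => pvStepA filesystem.length index (filesystem.getD index "") s)
    ([], false, [], 0)).1

-- ===== PORT B =====
-- two-pointer run scanner: run = 1 + length of the matching prefix of the tail
def pvRunScan : List String → Int → List (List Int)
  | [], _ => []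
  | x :: xs, i =>
    let isSpace := x == "."
    let run : Int := 1 + (xs.takeWhile (fun y => (y == ".") == isSpace)).length
    let rest := xs.dropWhile (fun y => (y == ".") == isSpace)
    (if isSpace then [[i, run]] else []) ++ pvRunScan rest (i + run)
termination_by l _ => l.length
decreasing_by
  have := List.length_dropWhile_le (p := fun y => (y == ".") == (x == ".")) (l := xs)
  simp_all

def find_available_space_blocks_alt (filesystem : List String) : List (List Int) :=
  pvRunScan filesystem 0

-- ===== PRECONDITION & SPEC =====
-- "the last element is '.' and the element before it (if any) is not":
-- the trailing space run has length exactly 1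
def pvTrailSingle (l : List String) : Bool :=
  (l.getLast? == some ".") && !(l.dropLast.getLast? == some ".")

-- On inputs whose last element is "." and whose second-to-last element is not
-- (a trailing space run of length exactly 1), A never flushes the block it just
-- opened and omits it, while B returns the block [n-1, 1], the intended value.
def D_find_available_space_blocks (filesystem : List String) : Prop :=
  pvTrailSingle filesystem = true
instance (filesystem : List String) : Decidable (D_find_available_space_blocks filesystem) := by
  unfold D_find_available_space_blocks; infer_instance

def Spec_find_available_space_blocks (filesystem : List String) (out : List (List Int)) : Prop :=
  ¬ D_find_available_space_blocks filesystem → out = find_available_space_blocks_alt filesystem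
instance (filesystem : List String) (out : List (List Int)) : Decidable (Spec_find_available_space_blocks filesystem out) := by
  unfold Spec_find_available_space_blocks; infer_instance

def pvDiffWitness_find_available_space_blocks : List String := ["."]
def pvDiffWitnessOut_find_available_space_blocks : (List (List Int)) × (List (List Int)) := ([], [[0, 1]])

-- ===== CLAIM (what is proved, stated in full; the proofs are below) =====
def Claim_unchanged_find_available_space_blocks : Prop := ∀ (filesystem : List String), Dom_find_available_space_blocks filesystem → Spec_find_available_space_blocks filesystem (find_available_space_blocks filesystem)
def Claim_changed_find_available_space_blocks : Prop := Dom_find_available_space_blocks (pvDiffWitness_find_available_space_blocks) ∧ D_find_available_space_blocks (pvDiffWitness_find_available_space_blocks) ∧ find_available_space_blocks (pvDiffWitness_find_available_space_blocks) = pvDiffWitnessOut_find_available_space_blocks.1 ∧ find_available_space_blocks_alt (pvDiffWitness_find_available_space_blocks) = pvDiffWitnessOut_find_available_space_blocks.2 ∧ pvDiffWitnessOut_find_available_space_blocks.1 ≠ pvDiffWitnessOut_find_available_space_blocks.2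
def Claim_exact_find_available_space_blocks : Prop := ∀ (filesystem : List String), Dom_find_available_space_blocks filesystem → D_find_available_space_blocks filesystem → find_available_space_blocks filesystem ≠ find_available_space_blocks_alt filesystem

-- ===== LEMMAS AND PROOFS =====

-- structural form of A's index loop
def pvAuxA (n : Nat) : List String → Nat → (List (List Int) × Bool × List Int × Int) → (List (List Int) × Bool × List Int × Int)
  | [], _, s => s
  | x :: xs, i, s => pvAuxA n xs (i+1) (pvStepA n i x s)

-- A's output from an out-of-block state at index i (a trailing single-dot run is dropped)
def pvAwr : List String → Int → List (List Int)
  | [], _ => []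
  | x :: xs, i =>
    if x == "." then
      let grp := xs.takeWhile (fun y => y == ".")
      let rest := xs.dropWhile (fun y => y == ".")
      let run : Int := 1 + grp.length
      (if rest.isEmpty && grp.isEmpty then [] else [[i, run]]) ++ pvAwr rest (i + run)
    else pvAwr xs (i + 1)
termination_by l _ => l.length
decreasing_by
  all_goals first
    | (have := List.length_dropWhile_le (p := fun y => y == ("." : String)) (l := xs); simp_all)
    | simp

theorem pv_getD_append_len (pre : List String) (x : String) (rest : List String) :
    (pre ++ x :: rest).getD pre.length "" = x := by
  simp [List.getD]

theorem pv_bridge (n : Nat) (fs : List String) : ∀ (suf pre : List String)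
    (s : List (List Int) × Bool × List Int × Int), fs = pre ++ suf →
    (List.range' pre.length suf.length).foldl
      (fun s index => pvStepA n index (fs.getD index "") s) s
      = pvAuxA n suf pre.length s := by
  intro suf
  induction suf with
  | nil => intro pre s _; simp [pvAuxA]
  | cons x rest ih =>
    intro pre s hfs
    rw [List.length_cons, List.range'_succ, List.foldl_cons]
    have hx : fs.getD pre.length "" = x := by rw [hfs]; exact pv_getD_append_len pre x rest
    rw [hx]
    have h2 : fs = (pre ++ [x]) ++ rest := by rw [hfs]; simp
    have := ih (pre ++ [x]) (pvStepA n pre.length x s) h2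
    simpa [pvAuxA] using this

theorem pv_lemIn (n : Nat) : ∀ (xs : List String) (i : Nat), i + xs.length = n →
    ∀ (blocks : List (List Int)) (t : List Int) (m : Int),
    pvAuxA n xs i (blocks, true, t, m) =
      (match xs.dropWhile (fun y => y == ".") with
      | [] =>
        if xs.isEmpty then (blocks, true, t, m)
        else (blocks ++ [t ++ [m + ((xs.takeWhile (fun y => y == ".")).length : Int)]], true,
              t ++ [m + ((xs.takeWhile (fun y => y == ".")).length : Int)],
              m + ((xs.takeWhile (fun y => y == ".")).length : Int))
      | _ :: rtail =>
        pvAuxA n rtail (i + (xs.takeWhile (fun y => y == ".")).length + 1)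
          (blocks ++ [t ++ [m + ((xs.takeWhile (fun y => y == ".")).length : Int)]], false,
           t ++ [m + ((xs.takeWhile (fun y => y == ".")).length : Int)],
           m + ((xs.takeWhile (fun y => y == ".")).length : Int))) := by
  intro xs
  induction xs with
  | nil => intro i _ blocks t m; simp [pvAuxA]
  | cons x xx ih =>
    intro i hn blocks t m
    by_cases hx : x = "."
    · subst hx
      by_cases hxx : xx = []
      · subst hxx
        have hi : i = n - 1 := by simp at hn; omega
        simp [pvAuxA, pvStepA, hi]
      · have hi : (i == n - 1) = false := by
          simp only [List.length_cons] at hn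
          have : xx.length ≥ 1 := List.length_pos_of_ne_nil hxx
          simp; omega
        have hrec : pvAuxA n ("." :: xx) i (blocks, true, t, m)
            = pvAuxA n xx (i+1) (blocks, true, t, m + 1) := by
          simp [pvAuxA, pvStepA, hi]
        rw [hrec, ih (i+1) (by simp at hn ⊢; omega) blocks t (m+1)]
        rcases hd : xx.dropWhile (fun y => y == ".") with _ | ⟨r, rtail⟩
        · have hxe : xx.isEmpty = false := by simp [hxx]
          simp only [hd, hxe, List.dropWhile_cons, List.takeWhile_cons, beq_self_eq_true,
            if_true, List.isEmpty_cons, List.length_cons, Bool.false_eq_true, if_false]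
          push_cast
          ring_nf
        · simp only [hd, List.dropWhile_cons, List.takeWhile_cons, beq_self_eq_true,
            if_true, List.length_cons]
          have harith : i + 1 + (xx.takeWhile (fun y => y == ".")).length + 1
              = i + ((xx.takeWhile (fun y => y == ".")).length + 1) + 1 := by omega
          rw [harith]
          push_cast
          ring_nf
    · have hxb : (x == ".") = false := by simp [hx]
      have hrec : pvAuxA n (x :: xx) i (blocks, true, t, m)
          = pvAuxA n xx (i+1) (blocks ++ [t ++ [m]], false, t ++ [m], m) := by
        simp [pvAuxA, pvStepA, hxb, hx]
      simp only [List.dropWhile_cons, List.takeWhile_cons, hxb, if_false, List.length_nil]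
      rw [hrec]
      norm_num

theorem pv_lemOut (n : Nat) : ∀ (k : Nat) (xs : List String), xs.length ≤ k →
    ∀ (i : Nat), i + xs.length = n →
    ∀ (blocks : List (List Int)) (t : List Int) (c : Int),
    (pvAuxA n xs i (blocks, false, t, c)).1 = blocks ++ pvAwr xs (i : Int) := by
  intro k
  induction k with
  | zero =>
    intro xs hk i _ blocks t c
    have : xs = [] := List.eq_nil_of_length_eq_zero (Nat.le_zero.mp hk)
    subst this; simp [pvAuxA, pvAwr]
  | succ k ih =>
    intro xs hk i hn blocks t c
    match xs with
    | [] => simp [pvAuxA, pvAwr]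
    | x :: xx =>
      by_cases hx : x = "."
      · subst hx
        have hrec : pvAuxA n ("." :: xx) i (blocks, false, t, c)
            = pvAuxA n xx (i+1) (blocks, true, [(i : Int)], 1) := by
          simp [pvAuxA, pvStepA]
        rw [hrec, pv_lemIn n xx (i+1) (by simp at hn ⊢; omega)]
        rcases hd : xx.dropWhile (fun y => y == ".") with _ | ⟨r, rtail⟩
        · by_cases hxx : xx = []
          · subst hxx; simp [pvAwr]
          · have hxe : xx.isEmpty = false := by simp [hxx]
            have hgrp : xx.takeWhile (fun y => y == ".") = xx := by
              have := List.takeWhile_append_dropWhile (p := fun y => y == ("." : String)) (l := xx)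
              rw [hd] at this; simpa using this
            simp only [hxe, Bool.false_eq_true, if_false]
            rw [pvAwr]
            simp [hd, hgrp, hxx, pvAwr]
        · dsimp only
          have hw : xx.dropWhile (fun y => y == ".") ≠ [] := by rw [hd]; simp
          have hr : (r == ".") = false := by
            have := List.head_dropWhile_not (p := fun y => y == ("." : String)) (l := xx) hw
            simpa [hd] using this
          have hlen : xx.length = (xx.takeWhile (fun y => y == ".")).length + 1 + rtail.length := by
            have := congrArg List.length
              (List.takeWhile_append_dropWhile (p := fun y => y == ("." : String)) (l := xx))
            rw [hd] at this; simp at this; omega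
          rw [ih rtail (by simp at hk; omega) (i + 1 + (xx.takeWhile (fun y => y == ".")).length + 1)
            (by simp at hn; omega) _ _ _]
          rw [pvAwr]
          simp only [hd, beq_self_eq_true, if_true, List.isEmpty_cons, Bool.false_and,
            Bool.false_eq_true, if_false]
          rw [pvAwr]
          simp only [hr, Bool.false_eq_true, if_false]
          push_cast
          ring_nf
          simp [List.append_assoc]
      · have hxb : (x == ".") = false := by simp [hx]
        have hrec : pvAuxA n (x :: xx) i (blocks, false, t, c)
            = pvAuxA n xx (i+1) (blocks, false, t, c) := by
          simp [pvAuxA, pvStepA, hxb]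
        rw [hrec, ih xx (by simp at hk; omega) (i+1) (by simp at hn ⊢; omega) blocks t c]
        rw [pvAwr]
        simp only [hxb, Bool.false_eq_true, if_false]
        push_cast
        ring_nf

theorem pv_ts_single (x : String) : pvTrailSingle [x] = (x == ".") := by
  simp [pvTrailSingle]

theorem pv_ts_cons (x : String) (xs : List String) (hx : (x == ".") = false) (hxs : xs ≠ []) :
    pvTrailSingle (x :: xs) = pvTrailSingle xs := by
  obtain ⟨y, ys, rfl⟩ := List.exists_cons_of_ne_nil hxs
  unfold pvTrailSingle
  rw [List.getLast?_cons_cons, List.dropLast_cons_of_ne_nil (by simp)]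
  rcases hdl : (y :: ys).dropLast with _ | ⟨z, zs⟩
  · simp [hx]
  · rw [List.getLast?_cons_cons]

theorem pv_ts_prepend (pre : List String) (r : String) (rest : List String) (hr : (r == ".") = false) :
    pvTrailSingle (pre ++ r :: rest) = pvTrailSingle (r :: rest) := by
  unfold pvTrailSingle
  rw [List.getLast?_append_of_ne_nil pre (by simp),
      List.dropLast_append_of_ne_nil (by simp)]
  rcases hrest : rest with _ | ⟨y, ys⟩
  · simp [hr]
  · rw [show (r :: y :: ys).dropLast = r :: (y :: ys).dropLast from
        List.dropLast_cons_of_ne_nil (by simp),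
      List.getLast?_append_of_ne_nil pre (by simp)]

theorem pv_ts_alldots (grp : List String) (hg : grp ≠ []) (hall : ∀ y ∈ grp, y = ".") :
    pvTrailSingle ("." :: grp) = false := by
  unfold pvTrailSingle
  have hdl : ("." :: grp).dropLast = "." :: grp.dropLast := List.dropLast_cons_of_ne_nil hg
  have hne : ("." :: grp).dropLast ≠ [] := by rw [hdl]; simp
  obtain ⟨a, ha⟩ := Option.isSome_iff_exists.mp (List.getLast?_isSome.mpr hne)
  have hamem : a ∈ ("." :: grp).dropLast := List.mem_of_getLast? ha
  have hadot : a = "." := by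
    rcases List.mem_cons.mp (List.mem_of_mem_dropLast hamem) with h | h
    . exact h
    . exact hall a h
  rw [ha, hadot]
  simp

theorem pv_runScan_ne_nil : ∀ (k : Nat) (xs : List String), xs.length ≤ k →
    "." ∈ xs → ∀ (i : Int), pvRunScan xs i ≠ [] := by
  intro k
  induction k with
  | zero =>
    intro xs hk hmem i
    have : xs = [] := List.eq_nil_of_length_eq_zero (Nat.le_zero.mp hk)
    subst this; cases hmem
  | succ k ih =>
    intro xs hk hmem i
    match xs with
    | [] => cases hmem
    | x :: xx =>
      rw [pvRunScan]
      by_cases hx : x = "."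
      · simp [hx]
      · have hxb : (x == ".") = false := by simp [hx]
        simp only [hxb, Bool.false_eq_true, if_false, List.nil_append]
        have hmem' : "." ∈ xx.dropWhile (fun y => (y == ".") == false) := by
          have h1 : "." ∈ xx := by
            rcases List.mem_cons.mp hmem with h | h
            · exact absurd h.symm hx
            · exact h
          rcases (List.mem_append).mp
            (List.takeWhile_append_dropWhile
              (p := fun y => (y == ".") == false) (l := xx) ▸ h1) with h | h
          · have := List.mem_takeWhile_imp h
            simp at this
          · exact h
        exact ih _ (le_trans (List.length_dropWhile_le _ xx) (by simp at hk; omega)) hmem' _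

theorem pv_runScan_skip (xs : List String) (j : Int) :
    pvRunScan xs j = pvRunScan (xs.dropWhile (fun y => (y == ".") == false))
      (j + ((xs.takeWhile (fun y => (y == ".") == false)).length : Int)) := by
  match xs with
  | [] => simp
  | z :: zz =>
    by_cases hz : z = "."
    · have : ((z == ".") == false) = false := by simp [hz]
      simp [List.takeWhile_cons, List.dropWhile_cons, this, hz]
    · have hzb : (z == ".") = false := by simp [hz]
      have hp : ((z == ".") == false) = true := by simp [hzb]
      rw [pvRunScan]
      simp only [hzb, Bool.false_eq_true, if_false, List.nil_append,
        List.takeWhile_cons, List.dropWhile_cons, hp, if_true]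
      congr 1
      simp only [show ((false : Bool) == false) = true from rfl, if_true, List.length_cons]
      push_cast
      ring_nf

theorem pv_runScan_cons_nondot (x : String) (hx : (x == ".") = false)
    (l : List String) (j : Int) : pvRunScan (x :: l) j = pvRunScan l (j + 1) := by
  rw [pvRunScan]
  simp only [hx, Bool.false_eq_true, if_false, List.nil_append]
  rw [pv_runScan_skip l (j + 1)]
  congr 1
  ring

theorem pv_awr_eq : ∀ (k : Nat) (xs : List String), xs.length ≤ k → ∀ (i : Int),
    pvAwr xs i = if pvTrailSingle xs then (pvRunScan xs i).dropLast else pvRunScan xs i := by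
  intro k
  induction k with
  | zero =>
    intro xs hk i
    have : xs = [] := List.eq_nil_of_length_eq_zero (Nat.le_zero.mp hk)
    subst this; simp [pvAwr, pvRunScan, pvTrailSingle]
  | succ k ih =>
    intro xs hk i
    match xs with
    | [] => simp [pvAwr, pvRunScan, pvTrailSingle]
    | x :: xx =>
      by_cases hx : x = "."
      · subst hx
        have hscan : pvRunScan ("." :: xx) i
            = [[i, 1 + ((xx.takeWhile (fun y => y == ".")).length : Int)]]
              ++ pvRunScan (xx.dropWhile (fun y => y == "."))
                  (i + (1 + ((xx.takeWhile (fun y => y == ".")).length : Int))) := by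
          rw [pvRunScan]; simp
        rcases hd : xx.dropWhile (fun y => y == ".") with _ | ⟨r, rtail⟩
        · by_cases hxx : xx = []
          · subst hxx
            rw [pvAwr]
            rw [hscan]
            simp [pvTrailSingle, pvRunScan, pvAwr]

          · have hgrp : xx.takeWhile (fun y => y == ".") = xx := by
              have := List.takeWhile_append_dropWhile (p := fun y => y == ("." : String)) (l := xx)
              rw [hd] at this; simpa using this
            have hall : ∀ y ∈ xx, y = "." := by
              intro y hy
              have := List.mem_takeWhile_imp (hgrp ▸ hy)
              simpa using this
            have hts : pvTrailSingle ("." :: xx) = false := pv_ts_alldots xx hxx hall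
            rw [pvAwr]
            rw [hscan, hd, hts]
            simp [pvAwr, pvRunScan, hgrp, hxx]
        · have hw : xx.dropWhile (fun y => y == ".") ≠ [] := by rw [hd]; simp
          have hr : (r == ".") = false := by
            have := List.head_dropWhile_not (p := fun y => y == ("." : String)) (l := xx) hw
            simpa [hd] using this
          have hxxeq : xx = xx.takeWhile (fun y => y == ".") ++ r :: rtail := by
            conv_lhs => rw [← List.takeWhile_append_dropWhile
              (p := fun y => y == ("." : String)) (l := xx)]
            rw [hd]
          have hts : pvTrailSingle ("." :: xx) = pvTrailSingle (r :: rtail) := by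
            conv_lhs => rw [hxxeq]
            exact pv_ts_prepend ("." :: xx.takeWhile (fun y => y == ".")) r rtail hr
          have hrtlen : rtail.length < xx.length := by
            have := congrArg List.length hxxeq; simp at this; omega
          rw [pvAwr]
          rw [hscan, hd]
          simp only [List.isEmpty_cons, Bool.false_and, Bool.false_eq_true, if_false]
          rw [pvAwr]
          simp only [hr, Bool.false_eq_true, if_false]
          rw [pv_runScan_cons_nondot r hr rtail _]
          rcases hrt : rtail with _ | ⟨w, ws⟩
          · have hts2 : pvTrailSingle (r :: rtail) = false := by
              rw [hrt, pv_ts_single, hr]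
            rw [hts, hts2]
            simp only [Bool.false_eq_true, if_false]
            rw [pvAwr, pvRunScan]
            simp
          · rw [← hrt]
            have hts3 : pvTrailSingle (r :: rtail) = pvTrailSingle rtail :=
              pv_ts_cons r rtail hr (by rw [hrt]; simp)
            rw [hts, hts3, ih rtail (by simp at hk; omega)]
            by_cases hts4 : pvTrailSingle rtail = true
            · rw [hts4]
              simp only [if_true]
              have hne : pvRunScan rtail (i + (1 + ((xx.takeWhile (fun y => y == ".")).length : Int)) + 1) ≠ [] := by
                apply pv_runScan_ne_nil rtail.length rtail le_rfl
                have h1 : rtail.getLast? = some "." := by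
                  unfold pvTrailSingle at hts4
                  simp only [Bool.and_eq_true, beq_iff_eq] at hts4
                  exact hts4.1
                exact List.mem_of_getLast? h1
              rw [List.dropLast_append_of_ne_nil hne]
              simp
            · simp only [Bool.not_eq_true] at hts4
              rw [hts4]
              simp
      · have hxb : (x == ".") = false := by simp [hx]
        rw [pvAwr]
        simp only [hxb, Bool.false_eq_true, if_false]
        rw [pv_runScan_cons_nondot x hxb xx i]
        by_cases hxx : xx = []
        · subst hxx
          rw [pvAwr, pvRunScan]
          simp [pvTrailSingle, hxb]
        · have hts : pvTrailSingle (x :: xx) = pvTrailSingle xx := pv_ts_cons x xx hxb hxx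
          rw [hts, ih xx (by simp at hk; omega)]

theorem pv_A_char (fs : List String) :
    find_available_space_blocks fs =
      if pvTrailSingle fs then (pvRunScan fs 0).dropLast else pvRunScan fs 0 := by
  have h0 : find_available_space_blocks fs = (pvAuxA fs.length fs 0 ([], false, [], 0)).1 := by
    unfold find_available_space_blocks
    rw [List.range_eq_range']
    exact congrArg Prod.fst (pv_bridge fs.length fs fs [] ([], false, [], 0) (by simp))
  rw [h0, pv_lemOut fs.length fs.length fs le_rfl 0 (by simp) [] [] 0]
  simp only [List.nil_append, Nat.cast_zero]
  exact pv_awr_eq fs.length fs le_rfl 0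

theorem find_available_space_blocks_spec : Claim_unchanged_find_available_space_blocks := by
  intro fs _ hnd
  rw [pv_A_char]
  unfold D_find_available_space_blocks at hnd
  simp only [Bool.not_eq_true] at hnd
  rw [if_neg (by simp [hnd])]
  rfl

theorem find_available_space_blocks_changed : Claim_changed_find_available_space_blocks := by
  unfold Claim_changed_find_available_space_blocks
  refine ⟨by decide, by decide, by decide, ?_, by decide⟩
  show find_available_space_blocks_alt ["."] = [[0, 1]]
  simp [find_available_space_blocks_alt, pvRunScan]

theorem find_available_space_blocks_tight : Claim_exact_find_available_space_blocks := by
  intro fs _ hd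
  unfold D_find_available_space_blocks at hd
  rw [pv_A_char, if_pos hd]
  have hmem : "." ∈ fs := by
    unfold pvTrailSingle at hd
    simp only [Bool.and_eq_true, beq_iff_eq] at hd
    exact List.mem_of_getLast? hd.1
  have hne : pvRunScan fs 0 ≠ [] := pv_runScan_ne_nil fs.length fs le_rfl hmem 0
  show (pvRunScan fs 0).dropLast ≠ find_available_space_blocks_alt fs
  unfold find_available_space_blocks_alt
  intro h
  have := congrArg List.length h
  rw [List.length_dropLast] at this
  have hlen : 0 < (pvRunScan fs 0).length := List.length_pos_of_ne_nil hne
  omega
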